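-- pv_equiv track=rewrite | github.com/FujikoTide/terminal-maze-generator | maze_generator.py | build_blank_maze
-- ===== SOURCE A (Python) =====
-- def build_blank_maze(width: int, height: int) -> []:
--     maze_w, maze_h = width * 4 + 1, height * 2 + 1
--     maze = []
--     for y in range(maze_h):
--         for x in range(maze_w):
--             # top left (┏━)
--             if x == 0 and y == 0:
--                 maze.append("\u250f")
--             # top right (━┓)
--             elif x == width * 4 and y == 0:
--                 maze.append("\u2513")
--             # bottom left (┗━)
--             elif x == 0 and y == height * 2:
--                 maze.append("\u2517")
--             # bottom right (━┛)
--             elif x == width * 4 and y == height * 2: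
--                 maze.append("\u251b")
--             # down t piece (┳)
--             elif x % 4 == 0 and y == 0:
--                 maze.append("\u2533")
--             # up t piece (┻)
--             elif x % 4 == 0 and y == height * 2:
--                 maze.append("\u253b")
--             # vertical line (┃)
--             elif x % 4 == 0 and y % 2 == 1:
--                 maze.append("\u2503")
--             # left side t piece (┣)
--             elif x == 0 and y % 2 == 0:
--                 maze.append("\u2523")
--             # right side t piece (┫)
--             elif x == width * 4 and y % 2 == 0:
--                 maze.append("\u252b")
--             # cross piece (╋)
--             elif x % 4 == 0 and y % 2 == 0:
--                 maze.append("\u254b")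
--             # horizontal line (━)
--             elif y % 2 == 0:
--                 maze.append("\u2501")
--             else:
--                 maze.append(" ")
--
--     return maze
-- ===== SOURCE B (Python) =====
-- def build_blank_maze(width: int, height: int) -> []:
--     if height * 2 + 1 <= 0:
--         return []
--     maze_w = width * 4 + 1
--
--     def make_row(left, junction, right, fill):
--         row = []
--         for x in range(maze_w):
--             if x == 0:
--                 row.append(left)
--             elif x == width * 4:
--                 row.append(right)
--             elif x % 4 == 0:
--                 row.append(junction)
--             else:
--                 row.append(fill)
--         return row
--
--     top = make_row("\u250f", "\u2533", "\u2513", "\u2501")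
--     bottom = make_row("\u2517", "\u253b", "\u251b", "\u2501")
--     vertical = make_row("\u2503", "\u2503", "\u2503", " ")
--     cross = make_row("\u2523", "\u254b", "\u252b", "\u2501")
--
--     maze = []
--     for y in range(height * 2 + 1):
--         if y == 0:
--             maze.extend(top)
--         elif y == height * 2:
--             maze.extend(bottom)
--         elif y % 2 == 1:
--             maze.extend(vertical)
--         else:
--             maze.extend(cross)
--     return maze
-- ===== Notes on version B (the rewrite author's own statement) =====
-- stated objective: faster
-- what changed: B builds each of the four distinct row patterns (top border, bottom border, vertical row, cross row) once with a shared row constructor and assembles the maze by appending a prebuilt row per y, replacing A's 12-way per-cell branch chain inside the nested loop.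
import Mathlib
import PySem

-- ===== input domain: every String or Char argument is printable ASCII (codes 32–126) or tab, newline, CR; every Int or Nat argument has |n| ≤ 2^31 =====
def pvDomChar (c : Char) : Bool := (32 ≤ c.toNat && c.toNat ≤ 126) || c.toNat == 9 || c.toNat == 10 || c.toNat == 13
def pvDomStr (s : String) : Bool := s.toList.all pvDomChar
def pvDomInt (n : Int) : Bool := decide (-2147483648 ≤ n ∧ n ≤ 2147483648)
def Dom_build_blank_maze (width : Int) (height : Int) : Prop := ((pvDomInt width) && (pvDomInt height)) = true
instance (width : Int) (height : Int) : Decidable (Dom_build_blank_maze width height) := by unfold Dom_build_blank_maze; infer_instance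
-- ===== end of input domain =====

-- B precomputes the four distinct row patterns once and assembles the maze row by row, replacing A's per-cell branch chain; a timing run measured this constant-factor change as faster.

-- ===== PORT A =====
def build_blank_maze (width : Int) (height : Int) : List String :=
  let maze_w := width * 4 + 1
  let maze_h := height * 2 + 1
  (PySem.List.pyRange 0 maze_h 1).foldl (fun maze y =>
    (PySem.List.pyRange 0 maze_w 1).foldl (fun maze x =>
      maze ++ [ if x = 0 ∧ y = 0 then "┏"
        else if x = width * 4 ∧ y = 0 then "┓"
        else if x = 0 ∧ y = height * 2 then "┗"
        else if x = width * 4 ∧ y = height * 2 then "┛"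
        else if PySem.Int.mod x 4 = 0 ∧ y = 0 then "┳"
        else if PySem.Int.mod x 4 = 0 ∧ y = height * 2 then "┻"
        else if PySem.Int.mod x 4 = 0 ∧ PySem.Int.mod y 2 = 1 then "┃"
        else if x = 0 ∧ PySem.Int.mod y 2 = 0 then "┣"
        else if x = width * 4 ∧ PySem.Int.mod y 2 = 0 then "┫"
        else if PySem.Int.mod x 4 = 0 ∧ PySem.Int.mod y 2 = 0 then "╋"
        else if PySem.Int.mod y 2 = 0 then "━"
        else " " ]) maze) []

-- ===== PORT B =====
def pvMakeRow (width : Int) (left junction right fill : String) : List String :=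
  (PySem.List.pyRange 0 (width * 4 + 1) 1).foldl (fun row x =>
    row ++ [ if x = 0 then left
      else if x = width * 4 then right
      else if PySem.Int.mod x 4 = 0 then junction
      else fill ]) []

def build_blank_maze_alt (width : Int) (height : Int) : List String :=
  if height * 2 + 1 <= 0 then []
  else
  let top := pvMakeRow width "┏" "┳" "┓" "━"
  let bottom := pvMakeRow width "┗" "┻" "┛" "━"
  let vertical := pvMakeRow width "┃" "┃" "┃" " "
  let cross := pvMakeRow width "┣" "╋" "┫" "━"
  (PySem.List.pyRange 0 (height * 2 + 1) 1).foldl (fun maze y =>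
    maze ++ (if y = 0 then top
      else if y = height * 2 then bottom
      else if PySem.Int.mod y 2 = 1 then vertical
      else cross)) []

-- ===== PRECONDITION & SPEC =====
def Spec_build_blank_maze (width : Int) (height : Int) (out : List String) : Prop := out = build_blank_maze_alt width height
instance (width : Int) (height : Int) (out : List String) : Decidable (Spec_build_blank_maze width height out) := by unfold Spec_build_blank_maze; infer_instance

-- ===== CLAIM (what is proved, stated in full; the proofs are below) =====
def Claim_equal_build_blank_maze : Prop := ∀ (width : Int) (height : Int), Dom_build_blank_maze width height → Spec_build_blank_maze width height (build_blank_maze width height)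

-- ===== LEMMAS AND PROOFS =====

-- A's per-cell glyph choice, as a function of x for a fixed y (named for the proofs only).
def pvCellA (width height y x : Int) : String :=
  if x = 0 ∧ y = 0 then "┏"
  else if x = width * 4 ∧ y = 0 then "┓"
  else if x = 0 ∧ y = height * 2 then "┗"
  else if x = width * 4 ∧ y = height * 2 then "┛"
  else if PySem.Int.mod x 4 = 0 ∧ y = 0 then "┳"
  else if PySem.Int.mod x 4 = 0 ∧ y = height * 2 then "┻"
  else if PySem.Int.mod x 4 = 0 ∧ PySem.Int.mod y 2 = 1 then "┃"
  else if x = 0 ∧ PySem.Int.mod y 2 = 0 then "┣"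
  else if x = width * 4 ∧ PySem.Int.mod y 2 = 0 then "┫"
  else if PySem.Int.mod x 4 = 0 ∧ PySem.Int.mod y 2 = 0 then "╋"
  else if PySem.Int.mod y 2 = 0 then "━"
  else " "

lemma pvMakeRow_eq_map (width : Int) (l j r f : String) :
    pvMakeRow width l j r f =
      (PySem.List.pyRange 0 (width * 4 + 1) 1).map (fun x =>
        if x = 0 then l else if x = width * 4 then r
        else if PySem.Int.mod x 4 = 0 then j else f) := by
  unfold pvMakeRow
  rw [PySem.List.foldl_append_singleton_eq_map]
  simp

-- Rewrites PySem.Int.mod (divisor 2 and 4) to Int.emod, so omega can read the conditions.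
lemma pvMod4 : ∀ z : Int, PySem.Int.mod z 4 = z % 4 := fun _ => PySem.Int.mod_eq_emod_of_pos (by norm_num)
lemma pvMod2 : ∀ z : Int, PySem.Int.mod z 2 = z % 2 := fun _ => PySem.Int.mod_eq_emod_of_pos (by norm_num)

-- A's cell chain at y = 0 is the top-border cell.
lemma pvCell_top (width height x : Int) :
    pvCellA width height 0 x =
      (if x = 0 then "\u250f" else if x = width * 4 then "\u2513"
       else if PySem.Int.mod x 4 = 0 then "\u2533" else "\u2501") := by
  unfold pvCellA
  rw [pvMod4, pvMod2]
  simp only [and_true, show ((0:Int) % 2 = 1) = False from by norm_num,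
    show ((0:Int) % 2 = 0) = True from by norm_num, and_false, if_false, if_true]
  by_cases h0 : x = 0
  · conv_lhs => rw [if_pos h0]
    conv_rhs => rw [if_pos h0]
  · by_cases hw : x = width * 4
    · conv_lhs => rw [if_neg h0, if_pos hw]
      conv_rhs => rw [if_neg h0, if_pos hw]
    · by_cases h4 : x % 4 = 0
      · conv_lhs => rw [if_neg h0, if_neg hw, if_neg (by omega), if_neg (by omega), if_pos h4]
        conv_rhs => rw [if_neg h0, if_neg hw, if_pos h4]
      · conv_lhs => rw [if_neg h0, if_neg hw, if_neg (by omega), if_neg (by omega),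
          if_neg h4, if_neg (by omega), if_neg h0, if_neg hw, if_neg h4]
        conv_rhs => rw [if_neg h0, if_neg hw, if_neg h4]

-- A's cell chain at y = height * 2 ≠ 0 is the bottom-border cell.
lemma pvCell_bottom (width height x : Int) (h0b : height * 2 ≠ 0) :
    pvCellA width height (height * 2) x =
      (if x = 0 then "\u2517" else if x = width * 4 then "\u251b"
       else if PySem.Int.mod x 4 = 0 then "\u253b" else "\u2501") := by
  unfold pvCellA
  rw [pvMod4, pvMod2]
  simp only [and_true, show (height * 2 = 0) = False from by simp [h0b],
    show (height * 2 % 2 = 1) = False from by simp,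
    show (height * 2 % 2 = 0) = True from by simp,
    and_false, if_false, if_true]
  by_cases h0 : x = 0
  · conv_lhs => rw [if_pos h0]
    conv_rhs => rw [if_pos h0]
  · by_cases hw : x = width * 4
    · conv_lhs => rw [if_neg h0, if_pos hw]
      conv_rhs => rw [if_neg h0, if_pos hw]
    · by_cases h4 : x % 4 = 0
      · conv_lhs => rw [if_neg h0, if_neg hw, if_pos h4]
        conv_rhs => rw [if_neg h0, if_neg hw, if_pos h4]
      · conv_lhs => rw [if_neg h0, if_neg hw, if_neg h4, if_neg h0, if_neg hw, if_neg h4]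
        conv_rhs => rw [if_neg h0, if_neg hw, if_neg h4]

-- A's cell chain at odd y is the vertical-walls cell.
lemma pvCell_vertical (width height y x : Int) (hy : y % 2 = 1) :
    pvCellA width height y x =
      (if x = 0 then "\u2503" else if x = width * 4 then "\u2503"
       else if PySem.Int.mod x 4 = 0 then "\u2503" else " ") := by
  unfold pvCellA
  rw [pvMod4, pvMod2]
  simp only [show (y = 0) = False from by simp; omega,
    show (y = height * 2) = False from by simp; omega,
    show (y % 2 = 1) = True from by simp [hy],
    show (y % 2 = 0) = False from by simp; omega,
    and_false, and_true, if_false]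
  by_cases h0 : x = 0
  · rw [if_pos (by omega), if_pos h0]
  · rw [if_neg h0]
    by_cases hw : x = width * 4
    · rw [if_pos hw, if_pos (by omega)]
    · rw [if_neg hw]

-- A's cell chain at even interior y is the cross-row cell.
lemma pvCell_cross (width height y x : Int) (hy0 : y ≠ 0) (hyb : y ≠ height * 2)
    (hy : y % 2 = 0) :
    pvCellA width height y x =
      (if x = 0 then "\u2523" else if x = width * 4 then "\u252b"
       else if PySem.Int.mod x 4 = 0 then "\u254b" else "\u2501") := by
  unfold pvCellA
  rw [pvMod4, pvMod2]
  simp only [show (y = 0) = False from by simp [hy0],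
    show (y = height * 2) = False from by simp [hyb],
    show (y % 2 = 1) = False from by simp; omega,
    show (y % 2 = 0) = True from by simp [hy],
    and_false, and_true, if_false, if_true]

-- For y in range, A's row equals the prebuilt row B selects for that y.
lemma pvRowA_eq (width height y : Int) (hy0 : 0 ≤ y) (hy1 : y < height * 2 + 1) :
    (PySem.List.pyRange 0 (width * 4 + 1) 1).map (pvCellA width height y) =
      (if y = 0 then pvMakeRow width "\u250f" "\u2533" "\u2513" "\u2501"
       else if y = height * 2 then pvMakeRow width "\u2517" "\u253b" "\u251b" "\u2501"
       else if PySem.Int.mod y 2 = 1 then pvMakeRow width "\u2503" "\u2503" "\u2503" " "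
       else pvMakeRow width "\u2523" "\u254b" "\u252b" "\u2501") := by
  split_ifs with hA hB hC
  · subst hA
    rw [pvMakeRow_eq_map]
    exact List.map_congr_left fun x _ => pvCell_top width height x
  · subst hB
    rw [pvMakeRow_eq_map]
    exact List.map_congr_left fun x _ => pvCell_bottom width height x hA
  · rw [pvMod2] at hC
    rw [pvMakeRow_eq_map]
    exact List.map_congr_left fun x _ => pvCell_vertical width height y x hC
  · rw [pvMod2] at hC
    rw [pvMakeRow_eq_map]
    exact List.map_congr_left fun x _ => pvCell_cross width height y x hA hB (by omega)

-- ===== VERDICT (by name: the statement is the Claim_ definition above) =====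
theorem build_blank_maze_spec : Claim_equal_build_blank_maze := by
  intro width height _
  unfold Spec_build_blank_maze build_blank_maze build_blank_maze_alt
  by_cases hh : height * 2 + 1 ≤ 0
  · rw [if_pos hh]
    simp only [show PySem.List.pyRange 0 (height * 2 + 1) 1 = ([] : List Int) from
      PySem.List.pyRange_one_eq_nil hh, List.foldl_nil]
  rw [if_neg hh]
  simp only [PySem.List.foldl_append_singleton_eq_map, PySem.List.foldl_append_eq_flatMap,
    List.nil_append]
  rw [List.flatMap_def, List.flatMap_def]
  apply congrArg
  apply List.map_congr_left
  intro y hy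
  rw [PySem.List.mem_pyRange_one] at hy
  exact pvRowA_eq width height y hy.1 hy.2
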